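-- pv_equiv track=rewrite | github.com/Vincero1023/joe_coding | projects/Keyword_Forge/app/title/quality.py | _contains_tokens_in_order
-- ===== SOURCE A (Python) =====
-- def _contains_tokens_in_order(keyword_tokens: list[str], title_tokens: list[str]) -> bool:
--     if not keyword_tokens:
--         return False
--
--     search_start = 0
--     for keyword_token in keyword_tokens:
--         matched = False
--         for index in range(search_start, len(title_tokens)):
--             if title_tokens[index] != keyword_token:
--                 continue
--             search_start = index + 1
--             matched = True
--             break
--         if not matched:
--             return False
--     return True
-- ===== SOURCE B (Python) =====
-- def _contains_tokens_in_order(keyword_tokens: list[str], title_tokens: list[str]) -> bool: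
--     if not keyword_tokens:
--         return False
--
--     # Index the title once: token -> sorted list of its positions.
--     positions = {}
--     for index, token in enumerate(title_tokens):
--         positions.setdefault(token, []).append(index)
--
--     need = 0
--     for keyword_token in keyword_tokens:
--         plist = positions.get(keyword_token)
--         if plist is None:
--             return False
--         # binary search: first position in plist that is >= need
--         lo, hi = 0, len(plist)
--         while lo < hi:
--             mid = (lo + hi) // 2
--             if plist[mid] < need:
--                 lo = mid + 1
--             else:
--                 hi = mid
--         if lo == len(plist):
--             return False
--         need = plist[lo] + 1
--     return True
-- ===== Notes on version B (the rewrite author's own statement) =====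
-- stated objective: alternative
-- what changed: Instead of A's stateful linear scan (search_start index with a nested range loop per keyword token), B builds a position index of the title in one pass (dict token -> sorted list of indices) and answers each keyword token by a hand-written binary search for the first position >= need.
import Mathlib
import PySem

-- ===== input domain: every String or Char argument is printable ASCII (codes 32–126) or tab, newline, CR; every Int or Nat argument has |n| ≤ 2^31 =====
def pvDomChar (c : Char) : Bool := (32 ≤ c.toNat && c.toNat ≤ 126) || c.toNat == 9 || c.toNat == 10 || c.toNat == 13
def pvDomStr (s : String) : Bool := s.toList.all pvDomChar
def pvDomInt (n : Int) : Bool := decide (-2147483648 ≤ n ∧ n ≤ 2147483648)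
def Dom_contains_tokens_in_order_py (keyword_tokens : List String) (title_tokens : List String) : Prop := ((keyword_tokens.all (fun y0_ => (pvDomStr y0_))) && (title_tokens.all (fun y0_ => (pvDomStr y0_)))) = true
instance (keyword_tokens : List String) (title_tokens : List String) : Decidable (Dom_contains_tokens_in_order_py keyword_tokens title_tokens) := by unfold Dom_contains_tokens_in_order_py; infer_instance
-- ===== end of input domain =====

-- B replaces A's repeated linear scans of the title by a one-pass position index
-- (token -> sorted positions) queried by binary search; alternative algorithm, same results.

-- ===== PORT A =====
-- inner `for index in range(search_start, len(title_tokens))` loop of A: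
-- first index ≥ start whose title token equals the keyword token, else none
def ctioFindFrom (title : List String) (start : Nat) (tok : String) : Option Nat :=
  if h : start < title.length then
    if title[start] = tok then some start
    else ctioFindFrom title (start + 1) tok
  else none
termination_by title.length - start

-- outer `for keyword_token in keyword_tokens` loop of A, threading search_start
def ctioLoopA (keyword_tokens : List String) (title : List String) (searchStart : Nat) : Bool :=
  match keyword_tokens with
  | [] => true
  | k :: rest =>
    match ctioFindFrom title searchStart k with
    | none => false              -- not matched: return False
    | some i => ctioLoopA rest title (i + 1)

def contains_tokens_in_order_py (keyword_tokens : List String) (title_tokens : List String) : Bool :=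
  if keyword_tokens = [] then false
  else ctioLoopA keyword_tokens title_tokens 0

-- ===== PORT B =====
-- `enumerate(title_tokens)` (hand port with Nat indices, exact: indices are 0,1,2,…)
def ctioEnum (s : Nat) (title : List String) : List (Nat × String) :=
  match title with
  | [] => []
  | t :: ts => (s, t) :: ctioEnum (s + 1) ts

-- `positions.setdefault(token, []).append(index)` over `enumerate(title_tokens)`
def ctioBuildPos (title : List String) : PySem.Dict String (List Nat) :=
  (ctioEnum 0 title).foldl (fun d p => d.modify p.2 [] (· ++ [p.1])) PySem.Dict.empty

-- the `while lo < hi` binary-search loop of B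
def ctioBS (plist : List Nat) (need lo hi : Nat) : Nat :=
  if lo < hi then
    let mid := (lo + hi) / 2
    if plist.getD mid 0 < need then ctioBS plist need (mid + 1) hi
    else ctioBS plist need lo mid
  else lo
termination_by hi - lo

-- the `for keyword_token in keyword_tokens` loop of B, threading `need`
def ctioLoopB (keyword_tokens : List String) (pos : PySem.Dict String (List Nat)) (need : Nat) : Bool :=
  match keyword_tokens with
  | [] => true
  | k :: rest =>
    match pos.get? k with
    | none => false              -- positions.get returned None
    | some plist =>
      let lo := ctioBS plist need 0 plist.length
      if lo = plist.length then false
      else ctioLoopB rest pos (plist.getD lo 0 + 1)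

def contains_tokens_in_order_py_alt (keyword_tokens : List String) (title_tokens : List String) : Bool :=
  if keyword_tokens = [] then false
  else ctioLoopB keyword_tokens (ctioBuildPos title_tokens) 0

-- ===== PRECONDITION & SPEC =====
def Spec_contains_tokens_in_order_py (keyword_tokens : List String) (title_tokens : List String) (out : Bool) : Prop := out = contains_tokens_in_order_py_alt keyword_tokens title_tokens
instance (keyword_tokens : List String) (title_tokens : List String) (out : Bool) : Decidable (Spec_contains_tokens_in_order_py keyword_tokens title_tokens out) := by unfold Spec_contains_tokens_in_order_py; infer_instance

-- ===== CLAIM (what is proved, stated in full; the proofs are below) =====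
def Claim_equal_contains_tokens_in_order_py : Prop := ∀ (keyword_tokens : List String) (title_tokens : List String), Dom_contains_tokens_in_order_py keyword_tokens title_tokens → Spec_contains_tokens_in_order_py keyword_tokens title_tokens (contains_tokens_in_order_py keyword_tokens title_tokens)

-- ===== LEMMAS AND PROOFS =====

-- ascending list of the indices ≥ s (s = running offset) at which `title` carries `tok`
def ctioIdxs (title : List String) (s : Nat) (tok : String) : List Nat :=
  match title with
  | [] => []
  | t :: ts => if t = tok then s :: ctioIdxs ts (s + 1) tok else ctioIdxs ts (s + 1) tok

theorem ctioIdxs_ge (title : List String) (s : Nat) (tok : String) :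
    ∀ x ∈ ctioIdxs title s tok, s ≤ x := by
  induction title generalizing s with
  | nil => simp [ctioIdxs]
  | cons t ts ih =>
    intro x hx
    unfold ctioIdxs at hx
    split at hx
    · rw [List.mem_cons] at hx
      rcases hx with rfl | hx
      · omega
      · have := ih (s + 1) x hx; omega
    · have := ih (s + 1) x hx; omega

theorem ctioIdxs_sorted (title : List String) (s : Nat) (tok : String) :
    (ctioIdxs title s tok).Pairwise (· < ·) := by
  induction title generalizing s with
  | nil => simp [ctioIdxs]
  | cons t ts ih =>
    unfold ctioIdxs
    split
    · exact List.pairwise_cons.mpr ⟨fun x hx => by have := ctioIdxs_ge ts (s + 1) tok x hx; omega, ih (s + 1)⟩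
    · exact ih (s + 1)

-- the grouping fold builds exactly the per-token index lists
theorem ctioGroup (l : List (Nat × String)) (d : PySem.Dict String (List Nat)) (tok : String) :
    (l.foldl (fun d p => d.modify p.2 [] (· ++ [p.1])) d).getD tok []
      = d.getD tok [] ++ ((l.filter (fun p => p.2 == tok)).map (·.1)) := by
  induction l generalizing d with
  | nil => simp
  | cons p ps ih =>
    simp only [List.foldl_cons, ih, List.filter_cons]
    by_cases h : p.2 = tok
    · simp [h, PySem.Dict.getD_modify_self]
    · rw [PySem.Dict.getD_modify, if_neg (fun hh => h hh.symm)]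
      simp [h]

theorem ctioEnum_filter (title : List String) (s : Nat) (tok : String) :
    ((ctioEnum s title).filter (fun p => p.2 == tok)).map (·.1) = ctioIdxs title s tok := by
  induction title generalizing s with
  | nil => simp [ctioEnum, ctioIdxs]
  | cons t ts ih =>
    unfold ctioEnum ctioIdxs
    by_cases h : t = tok <;> simp [h, ih (s + 1)]

theorem ctioBuildPos_getD (title : List String) (tok : String) :
    (ctioBuildPos title).getD tok [] = ctioIdxs title 0 tok := by
  rw [ctioBuildPos, ctioGroup, ctioEnum_filter]
  simp

-- dropWhile of the prefix < start of an index list is the index list of the dropped title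
theorem ctioIdxs_dropWhile (title : List String) (tok : String) :
    ∀ s start, s ≤ start →
    (ctioIdxs title s tok).dropWhile (fun x => decide (x < start))
      = ctioIdxs (title.drop (start - s)) start tok := by
  induction title with
  | nil => intro s start _; simp [ctioIdxs]
  | cons t ts ih =>
    intro s start hle
    rcases Nat.eq_or_lt_of_le hle with heq | hlt
    · subst heq
      simp only [Nat.sub_self, List.drop_zero]
      cases hC : ctioIdxs (t :: ts) s tok with
      | nil => simp
      | cons a as =>
        have ha : s ≤ a := ctioIdxs_ge (t :: ts) s tok a (by rw [hC]; simp)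
        rw [List.dropWhile_cons_of_neg (by simp; omega)]
    · have hd : (t :: ts).drop (start - s) = ts.drop (start - (s + 1)) := by
        have : start - s = (start - (s + 1)) + 1 := by omega
        rw [this, List.drop_succ_cons]
      rw [hd, ctioIdxs]
      split
      · rw [List.dropWhile_cons_of_pos (by simp; omega)]
        exact ih (s + 1) start (by omega)
      · exact ih (s + 1) start (by omega)

theorem ctioFindFrom_eq_head (title : List String) (tok : String) (start : Nat) :
    ctioFindFrom title start tok = (ctioIdxs (title.drop start) start tok).head? := by
  induction hn : title.length - start generalizing start with
  | zero =>
    have h : ¬ start < title.length := by omega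
    rw [List.drop_eq_nil_of_le (by omega), ctioFindFrom, dif_neg h]
    simp [ctioIdxs]
  | succ n ih =>
    have h : start < title.length := by omega
    rw [List.drop_eq_getElem_cons h, ctioFindFrom, dif_pos h]
    unfold ctioIdxs
    by_cases hk : title[start] = tok
    · simp [hk]
    · rw [if_neg hk, if_neg hk, ih (start + 1) (by omega)]

-- A's inner scan from `need` is head of the ≥-need suffix of the position list
theorem ctioFindFrom_eq (title : List String) (tok : String) (need : Nat) :
    ctioFindFrom title need tok
      = ((ctioIdxs title 0 tok).dropWhile (fun x => decide (x < need))).head? := by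
  rw [ctioIdxs_dropWhile title tok 0 need (Nat.zero_le _), Nat.sub_zero,
    ctioFindFrom_eq_head]

-- binary-search correctness: on a strictly increasing list, with the loop invariant,
-- the result r has everything before it < need and (if in range) l[r] ≥ need
theorem ctioBS_spec (l : List Nat) (need : Nat) :
    ∀ lo hi, l.Pairwise (· < ·) → lo ≤ hi → hi ≤ l.length →
    (∀ j, j < lo → ∀ h : j < l.length, l[j] < need) →
    (∀ j, hi ≤ j → ∀ h : j < l.length, need ≤ l[j]) →
    (ctioBS l need lo hi ≤ l.length ∧
     (∀ j, j < ctioBS l need lo hi → ∀ h : j < l.length, l[j] < need) ∧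
     (∀ h : ctioBS l need lo hi < l.length, need ≤ l[ctioBS l need lo hi])) := by
  intro lo hi
  induction hn : hi - lo using Nat.strong_induction_on generalizing lo hi with
  | _ n ih =>
    intro hsort hlh hhl H1 H2
    rw [ctioBS]
    by_cases hlt : lo < hi
    · rw [if_pos hlt]
      have hmidlt : (lo + hi) / 2 < hi := by omega
      have hmidge : lo ≤ (lo + hi) / 2 := by omega
      have hmlen : (lo + hi) / 2 < l.length := by omega
      have hget : l.getD ((lo + hi) / 2) 0 = l[(lo + hi) / 2] := List.getD_eq_getElem l 0 hmlen
      have hmono := List.pairwise_iff_getElem.mp hsort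
      by_cases hc : l.getD ((lo + hi) / 2) 0 < need
      · rw [if_pos hc]
        refine ih (hi - ((lo + hi) / 2 + 1)) (by omega) _ _ (by omega) hsort (by omega) hhl ?_ H2
        intro j hj h
        rcases Nat.lt_or_ge j ((lo + hi) / 2) with hj2 | hj2
        · have := hmono j ((lo + hi) / 2) h hmlen hj2
          rw [hget] at hc; omega
        · have : j = (lo + hi) / 2 := by omega
          subst this; rw [hget] at hc; omega
      · rw [if_neg hc]
        refine ih ((lo + hi) / 2 - lo) (by omega) _ _ (by omega) hsort (by omega) (by omega) H1 ?_
        intro j hj h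
        rcases Nat.lt_or_ge ((lo + hi) / 2) j with hj2 | hj2
        · have := hmono ((lo + hi) / 2) j hmlen h hj2
          rw [hget] at hc; omega
        · have : j = (lo + hi) / 2 := by omega
          subst this; rw [hget] at hc; omega
    · rw [if_neg hlt]
      exact ⟨by omega, fun j hj h => H1 j (by omega) h, fun h => H2 lo (by omega) h⟩

-- a list whose first r elements are < need and whose r-th is ≥ need drops exactly r
theorem ctioDropWhile_eq_drop (need : Nat) :
    ∀ (l : List Nat) (r : Nat), r ≤ l.length →
    (∀ j, j < r → ∀ h : j < l.length, l[j] < need) →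
    (∀ h : r < l.length, need ≤ l[r]) →
    l.dropWhile (fun x => decide (x < need)) = l.drop r := by
  intro l
  induction l with
  | nil => intro r h _ _; simp at h; simp [h]
  | cons a as ih =>
    intro r hr H1 H2
    cases r with
    | zero =>
      have := H2 (by simp)
      simp at this
      rw [List.dropWhile_cons_of_neg (by simp; omega), List.drop_zero]
    | succ r' =>
      have ha : a < need := by have := H1 0 (by omega) (by simp); simpa using this
      rw [List.dropWhile_cons_of_pos (by simp [ha]), List.drop_succ_cons]
      refine ih r' (by simpa using hr) ?_ ?_
      · intro j hj h
        have := H1 (j + 1) (by omega) (by simpa using h)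
        simpa using this
      · intro h
        have := H2 (by simpa using h)
        simpa using this

-- per-token step: B's dict lookup + binary search computes exactly A's linear scan
theorem ctioStep_none (title : List String) (k : String) (need : Nat)
    (hq : (ctioBuildPos title).get? k = none) :
    ctioFindFrom title need k = none := by
  have hnil : ctioIdxs title 0 k = [] := by
    rw [← ctioBuildPos_getD, PySem.Dict.getD_eq_get?_getD, hq]; rfl
  rw [ctioFindFrom_eq, hnil]; rfl

theorem ctioStep_some (title : List String) (k : String) (need : Nat) (plist : List Nat)
    (hq : (ctioBuildPos title).get? k = some plist) :
    ctioFindFrom title need k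
      = (if ctioBS plist need 0 plist.length = plist.length then none
         else some (plist.getD (ctioBS plist need 0 plist.length) 0)) := by
  have hpl : plist = ctioIdxs title 0 k := by
    rw [← ctioBuildPos_getD, PySem.Dict.getD_eq_get?_getD, hq]; rfl
  have hsort : plist.Pairwise (· < ·) := by rw [hpl]; exact ctioIdxs_sorted title 0 k
  obtain ⟨hr1, hr2, hr3⟩ := ctioBS_spec plist need 0 plist.length hsort (Nat.zero_le _)
    (le_refl _) (by intro j hj h; omega) (by intro j hj h; omega)
  rw [ctioFindFrom_eq, ← hpl, ctioDropWhile_eq_drop need plist _ hr1 hr2 hr3]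
  by_cases hrl : ctioBS plist need 0 plist.length = plist.length
  · rw [if_pos hrl, hrl, List.drop_length]; rfl
  · have hlt : ctioBS plist need 0 plist.length < plist.length := by omega
    rw [if_neg hrl, List.drop_eq_getElem_cons hlt]
    simp [List.getElem?_eq_getElem hlt]

theorem ctioLoop_eq (title : List String) :
    ∀ (ks : List String) (need : Nat),
    ctioLoopA ks title need = ctioLoopB ks (ctioBuildPos title) need := by
  intro ks
  induction ks with
  | nil => intro need; rfl
  | cons k rest ih =>
    intro need
    cases hq : (ctioBuildPos title).get? k with
    | none =>
      rw [ctioLoopA, ctioLoopB, hq, ctioStep_none title k need hq]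
    | some plist =>
      rw [ctioLoopA, ctioLoopB, hq, ctioStep_some title k need plist hq]
      by_cases h : ctioBS plist need 0 plist.length = plist.length
      · simp [h]
      · simp [h, ih]

-- ===== VERDICT (by name: the statement is the Claim_ definition above) =====
theorem contains_tokens_in_order_py_spec : Claim_equal_contains_tokens_in_order_py := by
  intro ks ts _
  unfold Spec_contains_tokens_in_order_py contains_tokens_in_order_py contains_tokens_in_order_py_alt
  by_cases h : ks = []
  · simp [h]
  · simp only [if_neg h]
    exact ctioLoop_eq ts ks 0
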